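-- pv_equiv track=rewrite | github.com/oblivi-ate/AI_project | ilp_flexible.py | check_dominated
-- ===== SOURCE A (Python) =====
-- def check_dominated(subsets):
--     """检查并移除被支配的子集"""
--     non_dominated = []
--     for i, s1 in enumerate(subsets):
--         dominated = False
--         for j, s2 in enumerate(subsets):
--             if i != j and s2.issubset(s1):
--                 dominated = True
--                 break
--         if not dominated:
--             non_dominated.append(s1)
--     return non_dominated
-- ===== SOURCE B (Python) =====
-- def check_dominated(subsets):
--     """检查并移除被支配的子集"""
--     # Count occurrences of each set (by canonical sorted-tuple key).
--     counts = {}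
--     for s in subsets:
--         key = tuple(sorted(s))
--         counts[key] = counts.get(key, 0) + 1
--     # Distinct sets, ordered by size: a dominator other than a duplicate
--     # must be strictly smaller, so the scan can stop at equal length.
--     distinct = sorted(counts, key=len)
--     result = []
--     for s in subsets:
--         if counts[tuple(sorted(s))] > 1:
--             continue  # a duplicate: dominated by its twin
--         dominated = False
--         for t in distinct:
--             if len(t) >= len(s):
--                 break
--             if all(x in s for x in t):
--                 dominated = True
--                 break
--         if not dominated:
--             result.append(s)
--     return result
-- ===== Notes on version B (the rewrite author's own statement) =====
-- stated objective: alternative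
-- what changed: Replaces A's all-pairs issubset double scan with a counting dict over canonical sorted-tuple keys (duplicates removed by count) plus a size-sorted distinct-set list scanned only up to the current set's length, since a non-duplicate dominator must be strictly smaller.
import Mathlib
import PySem

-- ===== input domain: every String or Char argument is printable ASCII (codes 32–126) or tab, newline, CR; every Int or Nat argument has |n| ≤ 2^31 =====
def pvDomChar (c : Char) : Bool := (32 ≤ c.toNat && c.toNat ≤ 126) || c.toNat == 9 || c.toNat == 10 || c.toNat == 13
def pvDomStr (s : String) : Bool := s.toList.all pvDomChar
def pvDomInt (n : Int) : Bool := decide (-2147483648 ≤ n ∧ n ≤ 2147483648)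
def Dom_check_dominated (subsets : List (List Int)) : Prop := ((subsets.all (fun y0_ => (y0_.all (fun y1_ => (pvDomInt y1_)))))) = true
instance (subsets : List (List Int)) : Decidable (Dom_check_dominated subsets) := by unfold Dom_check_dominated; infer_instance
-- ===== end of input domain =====

-- B replaces A's all-pairs issubset scan by a counting dict over canonical keys (removes duplicates
-- in O(1) per set) plus a size-sorted distinct-set list scanned only up to the current set's length
-- (objective: alternative decomposition; same worst-case order, prunes the inner scan).

-- ===== PORT A =====
-- s2.issubset(s1), ported by hand: exact = 'every element of s2 is a member of s1'
def pySubset (t s : List Int) : Bool := t.all (fun x => s.contains x)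

def check_dominated (subsets : List (List Int)) : List (List Int) :=
  let idx := PySem.List.enumerate subsets
  idx.foldl (fun nd p =>
    let dominated := idx.any (fun q => decide (p.1 ≠ q.1) && pySubset q.2 p.2)
    if dominated then nd else nd ++ [p.2]) []

-- ===== PORT B =====
-- tuple(sorted(s)), the canonical key
def keyOf (s : List Int) : List Int := PySem.List.sorted s (fun x => x)

-- the inner 'for t in distinct: if len(t) >= len(s): break; …' loop of Source B
def scanDom (s : List Int) : List (List Int) → Bool
  | [] => false
  | t :: rest =>
    if s.length ≤ t.length then false
    else if t.all (fun x => s.contains x) then true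
    else scanDom s rest

def check_dominated_alt (subsets : List (List Int)) : List (List Int) :=
  let counts : PySem.Dict (List Int) Int :=
    subsets.foldl (fun d s => d.insert (keyOf s) (d.getD (keyOf s) 0 + 1)) PySem.Dict.empty
  let distinct := PySem.List.sorted counts.keys (fun t => (t.length : Int))
  subsets.foldl (fun res s =>
    if 1 < counts.getD (keyOf s) 0 then res
    else if scanDom s distinct then res
    else res ++ [s]) []

-- ===== PRECONDITION & SPEC =====
-- Pre_ states the set-representation invariant of the type convention (the Python argument is a
-- list of SETS): each inner list holds pairwise-distinct elements. Lists with duplicated elements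
-- represent no Python input of A, so nothing is claimed there.
def Pre_check_dominated (subsets : List (List Int)) : Prop := ∀ s ∈ subsets, s.Nodup
instance (subsets : List (List Int)) : Decidable (Pre_check_dominated subsets) := by unfold Pre_check_dominated; infer_instance

def pvWitness_check_dominated : List (List Int) := [[1, 2], [3], [2, 1]]

def Spec_check_dominated (subsets : List (List Int)) (out : List (List Int)) : Prop := out = check_dominated_alt subsets
instance (subsets : List (List Int)) (out : List (List Int)) : Decidable (Spec_check_dominated subsets out) := by unfold Spec_check_dominated; infer_instance

-- ===== CLAIM (what is proved, stated in full; the proofs are below) =====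
def Claim_equal_check_dominated : Prop := ∀ (subsets : List (List Int)), Dom_check_dominated subsets → Pre_check_dominated subsets → Spec_check_dominated subsets (check_dominated subsets)

-- ===== LEMMAS AND PROOFS =====

-- Both programs keep s ∈ subsets iff at most one entry of subsets (s itself) is a subset of s.
def domCnt (subsets : List (List Int)) (s : List Int) : Nat :=
  subsets.countP (fun t => pySubset t s)

lemma pySubset_refl (s : List Int) : pySubset s s = true := by
  simp [pySubset]

lemma pySubset_iff (t s : List Int) : pySubset t s = true ↔ ∀ x ∈ t, x ∈ s := by
  simp [pySubset]

lemma two_le_length_of_two_mem {α : Type} {a b : α} {l : List α}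
    (ha : a ∈ l) (hb : b ∈ l) (h : a ≠ b) : 2 ≤ l.length := by
  cases l with
  | nil => simp at ha
  | cons c t =>
    rcases List.mem_cons.1 ha with rfl | ha
    · rcases List.mem_cons.1 hb with rfl | hb
      · exact absurd rfl h
      · have := List.length_pos_of_mem hb; simp; omega
    · have := List.length_pos_of_mem ha; simp; omega

lemma two_le_countP_of_two_mem {α : Type} {a b : α} {l : List α} {p : α → Bool}
    (ha : a ∈ l) (hb : b ∈ l) (h : a ≠ b) (hpa : p a = true) (hpb : p b = true) :
    2 ≤ l.countP p := by
  rw [List.countP_eq_length_filter]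
  exact two_le_length_of_two_mem (List.mem_filter.2 ⟨ha, hpa⟩) (List.mem_filter.2 ⟨hb, hpb⟩) h

-- A's inner any-loop over enumerate, characterised without the index
lemma any_enum_eq (subsets : List (List Int)) (i : Int) (s : List Int)
    (hmem : (i, s) ∈ PySem.List.enumerate subsets 0) :
    ((PySem.List.enumerate subsets 0).any (fun q => decide (i ≠ q.1) && pySubset q.2 s))
      = decide (2 ≤ domCnt subsets s) := by
  have hcnt : domCnt subsets s
      = (PySem.List.enumerate subsets 0).countP (fun q => pySubset q.2 s) := by
    unfold domCnt
    conv_lhs => rw [← PySem.List.map_snd_enumerate subsets 0]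
    rw [List.countP_map]
    rfl
  by_cases hany : ((PySem.List.enumerate subsets 0).any (fun q => decide (i ≠ q.1) && pySubset q.2 s)) = true
  · rw [hany]
    rcases List.any_eq_true.1 hany with ⟨q, hq, hprop⟩
    rw [Bool.and_eq_true] at hprop
    rcases hprop with ⟨hne, hsub⟩
    have hne' : i ≠ q.1 := of_decide_eq_true hne
    have h2 : 2 ≤ (PySem.List.enumerate subsets 0).countP (fun q => pySubset q.2 s) := by
      refine two_le_countP_of_two_mem hmem hq (fun hEq => hne' ?_) (pySubset_refl s) hsub
      rw [← hEq]
    rw [hcnt]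
    exact (decide_eq_true h2).symm
  · rw [Bool.not_eq_true] at hany
    rw [hany]
    -- show the count is < 2: every counted pair has first component i, and they are pairwise <
    by_contra hdec
    have h2 : 2 ≤ domCnt subsets s := by
      cases hd : decide (2 ≤ domCnt subsets s) with
      | false => exact absurd hd.symm hdec
      | true => exact of_decide_eq_true hd
    rw [hcnt, List.countP_eq_length_filter] at h2
    set fl := (PySem.List.enumerate subsets 0).filter (fun q => pySubset q.2 s) with hfl
    have hpw : fl.Pairwise (fun p q => p.1 < q.1) :=
      List.Pairwise.filter _ (PySem.List.pairwise_lt_enumerate subsets 0)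
    match hm : fl with
    | [] => rw [hm] at h2; simp at h2
    | [x] => rw [hm] at h2; simp at h2
    | x :: y :: rest =>
      rw [hm] at hpw
      have hxy : x.1 < y.1 := (List.pairwise_cons.1 hpw).1 y (by simp)
      have hx : x ∈ fl := by rw [hm]; simp
      have hy : y ∈ fl := by rw [hm]; simp
      have hxm := List.mem_filter.1 hx
      have hym := List.mem_filter.1 hy
      have : ∃ q ∈ PySem.List.enumerate subsets 0, i ≠ q.1 ∧ pySubset q.2 s = true := by
        by_cases hxi : i = x.1
        · exact ⟨y, hym.1, by omega, hym.2⟩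
        · exact ⟨x, hxm.1, hxi, hxm.2⟩
      rcases this with ⟨q, hq, hne, hsub⟩
      have : (PySem.List.enumerate subsets 0).any (fun q => decide (i ≠ q.1) && pySubset q.2 s) = true :=
        List.any_eq_true.2 ⟨q, hq, by simp [hne, hsub]⟩
      rw [this] at hany; simp at hany

-- A computes the filter by the count predicate
lemma check_dominated_eq_filter (subsets : List (List Int)) :
    check_dominated subsets
      = subsets.filter (fun s => !decide (2 ≤ domCnt subsets s)) := by
  unfold check_dominated
  have hbody : (fun (nd : List (List Int)) (p : Int × List Int) =>
        if ((PySem.List.enumerate subsets 0).any (fun q => decide (p.1 ≠ q.1) && pySubset q.2 p.2))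
        then nd else nd ++ [p.2])
      = (fun nd p =>
        if (!((PySem.List.enumerate subsets 0).any (fun q => decide (p.1 ≠ q.1) && pySubset q.2 p.2)))
        then nd ++ [p.2] else nd) := by
    funext nd p
    cases ((PySem.List.enumerate subsets 0).any (fun q => decide (p.1 ≠ q.1) && pySubset q.2 p.2)) <;> simp
  show (PySem.List.enumerate subsets 0).foldl _ [] = _
  rw [hbody, PySem.List.foldl_append_if
    (fun p => !((PySem.List.enumerate subsets 0).any (fun q => decide (p.1 ≠ q.1) && pySubset q.2 p.2)))
    (fun p => p.2) (PySem.List.enumerate subsets 0) []]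
  rw [List.filter_congr (q := fun p : Int × List Int => !decide (2 ≤ domCnt subsets p.2))
    (fun p hp => by
      obtain ⟨i, s⟩ := p
      rw [any_enum_eq subsets i s hp])]
  rw [show (fun p : Int × List Int => !decide (2 ≤ domCnt subsets p.2))
        = ((fun s => !decide (2 ≤ domCnt subsets s)) ∘ (fun p : Int × List Int => p.2)) from rfl,
      ← List.filter_map, PySem.List.map_snd_enumerate]
  rw [List.nil_append]

-- key facts under the set-representation invariant
lemma keyOf_perm (s : List Int) : (keyOf s).Perm s := PySem.List.sorted_perm s (fun x => x) false

lemma keyOf_eq_iff (t s : List Int) : keyOf t = keyOf s ↔ t.Perm s :=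
  PySem.List.sorted_id_eq_sorted_id_iff_perm t s

lemma subset_of_pySubset {t s : List Int} (h : pySubset t s = true) : t ⊆ s :=
  fun _ hx => (pySubset_iff t s).1 h _ hx

-- a strict dominator is strictly shorter; an equal-key entry is a full subset
lemma length_lt_of_strict (t s : List Int) (hnt : t.Nodup)
    (hsub : pySubset t s = true) (hne : ¬ t.Perm s) : t.length < s.length := by
  have hsp : t.Subperm s := List.subperm_of_subset hnt (subset_of_pySubset hsub)
  have hle := hsp.length_le
  rcases lt_or_eq_of_le hle with h | h
  · exact h
  · exact absurd (hsp.perm_of_length_le (le_of_eq h.symm)) hne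

lemma pySubset_of_perm_left {t t' s : List Int} (hp : t.Perm t') (h : pySubset t' s = true) :
    pySubset t s = true := by
  rw [pySubset_iff] at h ⊢
  exact fun x hx => h x (hp.mem_iff.1 hx)

-- the break-at-length loop equals an unbounded any over a length-sorted list
lemma scanDom_eq_any (s : List Int) (l : List (List Int))
    (hpw : l.Pairwise (fun a b => a.length ≤ b.length)) :
    scanDom s l = l.any (fun t => decide (t.length < s.length) && pySubset t s) := by
  induction l with
  | nil => rfl
  | cons t rest ih =>
    rcases List.pairwise_cons.1 hpw with ⟨hhead, htail⟩
    by_cases hlen : s.length ≤ t.length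
    · have hrest : ∀ u ∈ rest, ¬ (decide (u.length < s.length) && pySubset u s) = true := by
        intro u hu
        have := hhead u hu
        simp only [Bool.and_eq_true, decide_eq_true_iff]
        rintro ⟨h, -⟩
        omega
      simp only [scanDom, if_pos hlen, List.any_cons]
      rw [List.any_eq_false.2 hrest]
      simp [show ¬ t.length < s.length by omega]
    · by_cases hsub : t.all (fun x => s.contains x) = true
      · simp only [scanDom, if_neg hlen, if_pos hsub, List.any_cons]
        have : pySubset t s = true := hsub
        simp [this, show t.length < s.length by omega]
      · simp only [scanDom, if_neg hlen, List.any_cons]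
        rw [if_neg hsub, ih htail]
        have : pySubset t s = false := by
          cases h : pySubset t s
          · rfl
          · exact absurd h hsub
        simp [this]

-- B computes the same filter
lemma check_dominated_alt_eq_filter (subsets : List (List Int))
    (hpre : Pre_check_dominated subsets) :
    check_dominated_alt subsets
      = subsets.filter (fun s => !decide (2 ≤ domCnt subsets s)) := by
  unfold check_dominated_alt
  have hcounter : subsets.foldl (fun d s => d.insert (keyOf s) (d.getD (keyOf s) 0 + 1))
        PySem.Dict.empty
      = PySem.Dict.counter (subsets.map keyOf) := by
    rw [← PySem.Dict.foldl_insert_getD_add_one_eq_counter, List.foldl_map]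
  simp only [hcounter, PySem.Dict.keys_counter]
  set distinct := PySem.List.sorted (PySem.Set.ofList (subsets.map keyOf))
      (fun t => ((t : List Int).length : Int)) with hdist
  have hpw : distinct.Pairwise (fun a b => a.length ≤ b.length) := by
    have := PySem.List.sorted_pairwise (PySem.Set.ofList (subsets.map keyOf))
      (fun t => ((t : List Int).length : Int))
    exact this.imp (by intro a b h; exact_mod_cast h)
  -- the per-element predicate identity
  have hpt : ∀ s ∈ subsets,
      (!(decide (1 < (PySem.Dict.counter (subsets.map keyOf)).getD (keyOf s) 0)
          || scanDom s distinct))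
        = !decide (2 ≤ domCnt subsets s) := by
    intro s hs
    have hns : s.Nodup := hpre s hs
    -- the duplicate count
    rw [PySem.Dict.getD_counter]
    have hcm : (subsets.map keyOf).count (keyOf s)
        = subsets.countP (fun t => keyOf t == keyOf s) := by
      rw [List.count, List.countP_map]; rfl
    -- split domCnt into equal-key and strictly-smaller parts
    have hsplit := List.countP_eq_countP_filter_add subsets
      (fun t => pySubset t s) (fun t => keyOf t == keyOf s)
    have heqpart : (subsets.filter (fun t => keyOf t == keyOf s)).countP (fun t => pySubset t s)
        = subsets.countP (fun t => keyOf t == keyOf s) := by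
      rw [List.countP_eq_length.2, List.countP_eq_length_filter]
      intro t ht
      rcases List.mem_filter.1 ht with ⟨_, hkey⟩
      have hperm : t.Perm s := (keyOf_eq_iff t s).1 (by simpa using hkey)
      rw [pySubset_iff]
      exact fun x hx => hperm.mem_iff.1 hx
    -- the strict part is nonempty iff the distinct scan fires
    have hscan : scanDom s distinct
        = decide (0 < (subsets.filter (fun t => !(keyOf t == keyOf s))).countP
            (fun t => pySubset t s)) := by
      rw [scanDom_eq_any s distinct hpw]
      cases hany : distinct.any (fun t => decide (t.length < s.length) && pySubset t s)
      · symm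
        rw [decide_eq_false_iff_not]
        intro hpos
        rcases List.countP_pos_iff.1 hpos with ⟨t, htm, hts⟩
        rcases List.mem_filter.1 htm with ⟨htmem, hkne⟩
        have hnt : t.Nodup := hpre t htmem
        have hnp : ¬ t.Perm s := fun hp => by simp [(keyOf_eq_iff t s).2 hp] at hkne
        have hlt : t.length < s.length := length_lt_of_strict t s hnt hts hnp
        have hk : keyOf t ∈ distinct := by
          rw [hdist, PySem.List.mem_sorted, PySem.Set.mem_ofList]
          exact List.mem_map.2 ⟨t, htmem, rfl⟩
        have : distinct.any (fun u => decide (u.length < s.length) && pySubset u s) = true := by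
          refine List.any_eq_true.2 ⟨keyOf t, hk, ?_⟩
          have h1 : (keyOf t).length = t.length := (keyOf_perm t).length_eq
          have h2 : pySubset (keyOf t) s = true := pySubset_of_perm_left (keyOf_perm t) hts
          simp [h1, h2, hlt]
        rw [this] at hany; simp at hany
      · symm
        rw [decide_eq_true_iff]
        rcases List.any_eq_true.1 hany with ⟨u, hum, hprop⟩
        rw [Bool.and_eq_true] at hprop
        rcases hprop with ⟨hlt', hus⟩
        have hlt : u.length < s.length := of_decide_eq_true hlt'
        rw [hdist, PySem.List.mem_sorted, PySem.Set.mem_ofList] at hum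
        rcases List.mem_map.1 hum with ⟨t, htmem, rfl⟩
        have hperm := keyOf_perm t
        refine List.countP_pos_iff.2 ⟨t, List.mem_filter.2 ⟨htmem, ?_⟩, ?_⟩
        · have hnp : ¬ (keyOf t == keyOf s) = true := by
            intro hk
            have : t.Perm s := (keyOf_eq_iff t s).1 (by simpa using hk)
            have := this.length_eq
            have := hperm.length_eq
            omega
          simp only [Bool.not_eq_true'] at *
          cases h : (keyOf t == keyOf s)
          · rfl
          · exact absurd h hnp
        · exact pySubset_of_perm_left hperm.symm hus
    -- s itself contributes one equal-key entry
    have hone : 1 ≤ subsets.countP (fun t => keyOf t == keyOf s) := by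
      rw [List.countP_eq_length_filter]
      exact List.length_pos_of_mem (List.mem_filter.2 ⟨hs, by simp⟩)
    rw [hcm, hscan]
    unfold domCnt
    rw [hsplit, heqpart]
    set a := subsets.countP (fun t => keyOf t == keyOf s)
    set b := (subsets.filter (fun t => !(keyOf t == keyOf s))).countP (fun t => pySubset t s)
    congr 1
    rw [Bool.eq_iff_iff]
    simp only [Bool.or_eq_true, decide_eq_true_iff]
    constructor
    · rintro (h | h)
      · have : 1 < a := by exact_mod_cast h
        omega
      · omega
    · intro h
      by_cases h1 : 1 < a
      · left; exact_mod_cast h1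
      · right; omega
  -- fold to filter
  have hbody : (fun (res : List (List Int)) (s : List Int) =>
        if 1 < (PySem.Dict.counter (subsets.map keyOf)).getD (keyOf s) 0 then res
        else if scanDom s distinct then res
        else res ++ [s])
      = (fun res s =>
        if (!(decide (1 < (PySem.Dict.counter (subsets.map keyOf)).getD (keyOf s) 0)
            || scanDom s distinct)) then res ++ [s] else res) := by
    funext res s
    by_cases h1 : 1 < (subsets.map keyOf).count (keyOf s)
    · simp [h1]
    · simp [h1]
      cases scanDom s distinct <;> simp
  rw [hbody, PySem.List.foldl_append_if _ (fun s => s) subsets []]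
  rw [List.filter_congr hpt]
  simp

-- ===== VERDICT (by name: the statement is the Claim_ definition above) =====
theorem check_dominated_spec : Claim_equal_check_dominated := by
  intro subsets _ hpre
  unfold Spec_check_dominated
  rw [check_dominated_eq_filter, check_dominated_alt_eq_filter subsets hpre]
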